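-- pv_equiv track=rewrite | github.com/kcerauno/SLOT_AND_HMM | hypothesis/02_compound_hmm/source/compound_boundary_analysis.py | find_v8_splits_first
-- ===== SOURCE A (Python) =====
-- SLOTS_V8 = [
--     ["l", "r", "o", "y", "s", "v"],
--     ["q", "s", "d", "x", "l", "r", "h", "z"],
--     ["o", "y"], ["d", "r"], ["t", "k", "p", "f"],
--     ["ch", "sh"], ["cth", "ckh", "cph", "cfh"],
--     ["eee", "ee", "e", "g"],
--     ["k", "t", "p", "f", "ch", "sh", "l", "r", "o", "y"],
--     ["s", "d", "c"], ["o", "a", "y"], ["iii", "ii", "i"],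
--     ["d", "l", "r", "m", "n"], ["s"], ["y"],
--     ["k", "t", "p", "f", "l", "r", "o", "y"],
-- ]
--
-- def parse_greedy(word: str) -> tuple:
--     pos = 0
--     matched = []
--     for idx, options in enumerate(SLOTS_V8):
--         if pos >= len(word):
--             break
--         for opt in options:
--             if word.startswith(opt, pos):
--                 matched.append((idx, opt))
--                 pos += len(opt)
--                 break
--     return matched, word[pos:]
--
-- def is_base(word: str) -> bool:
--     m, r = parse_greedy(word)
--     return r == "" and bool(m)
--
-- def find_v8_splits_first(word: str):
--     """
--     is_v8 と同一の探索順で最初の有効分割を返す (2基以上のみ)。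
--     1基マッチの場合は None を返す（単独ベース語は複合語ではない）。
--     V8複合語でない場合も None。
--     """
--     for i in range(1, len(word)):
--         p1 = word[:i]
--         if not is_base(p1):
--             continue
--         rest = word[i:]
--         if is_base(rest):
--             return (p1, rest)
--         for j in range(1, len(rest)):
--             p2 = rest[:j]
--             if not is_base(p2):
--                 continue
--             rest2 = rest[j:]
--             if is_base(rest2):
--                 return (p1, p2, rest2)
--             for k in range(1, len(rest2)):
--                 if is_base(rest2[:k]) and is_base(rest2[k:]):
--                     return (p1, p2, rest2[:k], rest2[k:])
--     return None
-- ===== SOURCE B (Python) =====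
-- # B: single recursive depth-limited search over absolute indices instead of A's three
-- # hand-unrolled nested loops over nested slices; same first-match order, same results.
-- SLOTS_V8 = [
--     ["l", "r", "o", "y", "s", "v"],
--     ["q", "s", "d", "x", "l", "r", "h", "z"],
--     ["o", "y"], ["d", "r"], ["t", "k", "p", "f"],
--     ["ch", "sh"], ["cth", "ckh", "cph", "cfh"],
--     ["eee", "ee", "e", "g"],
--     ["k", "t", "p", "f", "ch", "sh", "l", "r", "o", "y"],
--     ["s", "d", "c"], ["o", "a", "y"], ["iii", "ii", "i"],
--     ["d", "l", "r", "m", "n"], ["s"], ["y"],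
--     ["k", "t", "p", "f", "l", "r", "o", "y"],
-- ]
--
-- def parse_greedy(word: str) -> tuple:
--     pos = 0
--     matched = []
--     for idx, options in enumerate(SLOTS_V8):
--         if pos >= len(word):
--             break
--         for opt in options:
--             if word.startswith(opt, pos):
--                 matched.append((idx, opt))
--                 pos += len(opt)
--                 break
--     return matched, word[pos:]
--
-- def is_base(word: str) -> bool:
--     m, r = parse_greedy(word)
--     return r == "" and bool(m)
--
-- def find_v8_splits_first(word: str):
--     n = len(word)
--
--     def search(start, depth):
--         # first decomposition of word[start:] into at most `depth` base words,
--         # preferring the undivided suffix, then the earliest cut (A's order)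
--         if is_base(word[start:]):
--             return [word[start:]]
--         if depth > 1:
--             for cut in range(start + 1, n):
--                 if is_base(word[start:cut]):
--                     r = search(cut, depth - 1)
--                     if r is not None:
--                         return [word[start:cut]] + r
--         return None
--
--     for i in range(1, n):
--         if is_base(word[:i]):
--             r = search(i, 3)
--             if r is not None:
--                 return tuple([word[:i]] + r)
--     return None
-- ===== Notes on version B (the rewrite author's own statement) =====
-- stated objective: alternative
-- what changed: A's three hand-unrolled nested loops over nested relative slices are replaced by one uniform depth-limited recursive search(start, depth) over absolute indices that prefers the undivided suffix and then the earliest cut, preserving A's search order exactly.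
import Mathlib
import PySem

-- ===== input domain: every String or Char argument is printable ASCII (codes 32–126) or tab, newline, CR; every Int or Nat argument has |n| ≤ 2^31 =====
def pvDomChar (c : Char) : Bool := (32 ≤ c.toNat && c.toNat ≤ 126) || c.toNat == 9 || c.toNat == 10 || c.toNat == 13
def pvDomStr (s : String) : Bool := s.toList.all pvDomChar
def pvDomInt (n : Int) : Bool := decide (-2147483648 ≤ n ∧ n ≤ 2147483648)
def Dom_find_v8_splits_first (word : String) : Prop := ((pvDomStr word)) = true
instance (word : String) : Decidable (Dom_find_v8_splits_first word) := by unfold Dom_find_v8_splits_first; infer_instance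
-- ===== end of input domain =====

-- B replaces A's three hand-unrolled nested loops over nested slices by one recursive
-- depth-limited search over absolute indices, in the same first-match order (objective: alternative).

-- ===== PORT A =====
def pvSLOTS_V8 : List (List (List Char)) :=
  [ [['l'],['r'],['o'],['y'],['s'],['v']],
    [['q'],['s'],['d'],['x'],['l'],['r'],['h'],['z']],
    [['o'],['y']], [['d'],['r']], [['t'],['k'],['p'],['f']],
    [['c','h'],['s','h']], [['c','t','h'],['c','k','h'],['c','p','h'],['c','f','h']],
    [['e','e','e'],['e','e'],['e'],['g']],
    [['k'],['t'],['p'],['f'],['c','h'],['s','h'],['l'],['r'],['o'],['y']],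
    [['s'],['d'],['c']], [['o'],['a'],['y']], [['i','i','i'],['i','i'],['i']],
    [['d'],['l'],['r'],['m'],['n']], [['s']], [['y']],
    [['k'],['t'],['p'],['f'],['l'],['r'],['o'],['y']] ]

-- inner 'for opt in options: if word.startswith(opt, pos): …; break' — first matching option;
-- word.startswith(opt, pos) with 0 ≤ pos ≤ len(word) is exactly: opt is a prefix of word[pos:]
def pvFirstOpt (rest : List Char) : List (List Char) → Option (List Char)
  | [] => none
  | opt :: opts => if PySem.Chars.startswith rest opt then some opt else pvFirstOpt rest opts

-- the 'for idx, options in enumerate(SLOTS_V8)' loop of parse_greedy; 'break' when pos ≥ len(word)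
def pvPgLoop (w : List Char) : List (Int × List (List Char)) → Nat → List (Int × List Char) → (List (Int × List Char)) × Nat
  | [], pos, matched => (matched, pos)
  | (idx, options) :: slots, pos, matched =>
    if w.length ≤ pos then (matched, pos)
    else match pvFirstOpt (w.drop pos) options with
      | some opt => pvPgLoop w slots (pos + opt.length) (matched ++ [(idx, opt)])
      | none => pvPgLoop w slots pos matched

-- parse_greedy; word[pos:] with 0 ≤ pos is List.drop pos (pos only grows from 0 here)
def pvParseGreedy (w : List Char) : (List (Int × List Char)) × List Char :=
  let mp := pvPgLoop w (PySem.List.enumerate pvSLOTS_V8) 0 []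
  (mp.1, w.drop mp.2)

-- is_base: r == "" and bool(m)
def pvIsBase (w : List Char) : Bool :=
  let mr := pvParseGreedy w
  decide (mr.2 = []) && !mr.1.isEmpty

-- innermost 'for k in range(1, len(rest2))' of A; slices word2[:k] / word2[k:] are take/drop
def pvALoopK (p1 p2 rest2 : List Char) : List Nat → Option (List String)
  | [] => none
  | k :: ks =>
    if pvIsBase (rest2.take k) && pvIsBase (rest2.drop k) then
      some [String.ofList p1, String.ofList p2, String.ofList (rest2.take k), String.ofList (rest2.drop k)]
    else pvALoopK p1 p2 rest2 ks

-- middle 'for j in range(1, len(rest))' of A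
def pvALoopJ (p1 rest : List Char) : List Nat → Option (List String)
  | [] => none
  | j :: js =>
    if !pvIsBase (rest.take j) then pvALoopJ p1 rest js
    else if pvIsBase (rest.drop j) then
      some [String.ofList p1, String.ofList (rest.take j), String.ofList (rest.drop j)]
    else match pvALoopK p1 (rest.take j) (rest.drop j) (List.range' 1 ((rest.drop j).length - 1)) with
      | some r => some r
      | none => pvALoopJ p1 rest js

-- outer 'for i in range(1, len(word))' of A
def pvALoopI (w : List Char) : List Nat → Option (List String)
  | [] => none
  | i :: is =>
    if !pvIsBase (w.take i) then pvALoopI w is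
    else if pvIsBase (w.drop i) then
      some [String.ofList (w.take i), String.ofList (w.drop i)]
    else match pvALoopJ (w.take i) (w.drop i) (List.range' 1 ((w.drop i).length - 1)) with
      | some r => some r
      | none => pvALoopI w is

def find_v8_splits_first (word : String) : Option (List String) :=
  pvALoopI word.toList (List.range' 1 (word.toList.length - 1))

-- ===== PORT B =====
-- the 'for cut in range(start+1, n)' loop inside search; `rec` is the recursive call at depth-1
def pvBCuts (w : List Char) (rec : Nat → Option (List String)) (start : Nat) : List Nat → Option (List String)
  | [] => none
  | c :: cs =>
    if pvIsBase ((w.drop start).take (c - start)) then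
      match rec c with
      | some r => some (String.ofList ((w.drop start).take (c - start)) :: r)
      | none => pvBCuts w rec start cs
    else pvBCuts w rec start cs

-- search(start, depth): first decomposition of word[start:] into at most depth base words
-- (structural recursion on depth; 'depth > 1' reads as '0 < depth - 1' on the predecessor)
def pvBSearch (w : List Char) (n : Nat) : Nat → Nat → Option (List String)
  | 0, _ => none
  | d + 1, start =>
    if pvIsBase (w.drop start) then some [String.ofList (w.drop start)]
    else if 0 < d then pvBCuts w (pvBSearch w n d) start (List.range' (start + 1) (n - (start + 1)))
    else none

-- the top-level 'for i in range(1, n)' loop of B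
def pvBTop (w : List Char) (n : Nat) : List Nat → Option (List String)
  | [] => none
  | i :: is =>
    if pvIsBase (w.take i) then
      match pvBSearch w n 3 i with
      | some r => some (String.ofList (w.take i) :: r)
      | none => pvBTop w n is
    else pvBTop w n is

def find_v8_splits_first_alt (word : String) : Option (List String) :=
  let w := word.toList
  pvBTop w w.length (List.range' 1 (w.length - 1))

-- ===== PRECONDITION & SPEC =====
def Spec_find_v8_splits_first (word : String) (out : Option (List String)) : Prop := out = find_v8_splits_first_alt word
instance (word : String) (out : Option (List String)) : Decidable (Spec_find_v8_splits_first word out) := by unfold Spec_find_v8_splits_first; infer_instance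

-- ===== CLAIM (what is proved, stated in full; the proofs are below) =====
def Claim_equal_find_v8_splits_first : Prop := ∀ (word : String), Dom_find_v8_splits_first word → Spec_find_v8_splits_first word (find_v8_splits_first word)

-- ===== LEMMAS AND PROOFS =====

-- evaluation of pvBSearch at the three depths the ports use
theorem pvBSearch_one (w : List Char) (n start : Nat) :
    pvBSearch w n 1 start = if pvIsBase (w.drop start) then some [String.ofList (w.drop start)] else none := rfl

theorem pvBSearch_two (w : List Char) (n start : Nat) :
    pvBSearch w n 2 start = if pvIsBase (w.drop start) then some [String.ofList (w.drop start)]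
      else pvBCuts w (pvBSearch w n 1) start (List.range' (start + 1) (n - (start + 1))) := rfl

theorem pvBSearch_three (w : List Char) (n start : Nat) :
    pvBSearch w n 3 start = if pvIsBase (w.drop start) then some [String.ofList (w.drop start)]
      else pvBCuts w (pvBSearch w n 2) start (List.range' (start + 1) (n - (start + 1))) := rfl

-- A's innermost k-loop over relative cuts of word[s:] = B's cut loop at depth 1 over absolute cuts
theorem pvALoopK_eq (w : List Char) (n s : Nat) (p1 p2 : List Char) (ks : List Nat) :
    pvALoopK p1 p2 (w.drop s) ks =
      (pvBCuts w (pvBSearch w n 1) s (ks.map (s + ·))).map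
        (fun r => String.ofList p1 :: String.ofList p2 :: r) := by
  induction ks with
  | nil => simp [pvALoopK, pvBCuts]
  | cons k ks ih =>
    simp only [List.map_cons, pvALoopK, pvBCuts]
    have hts : s + k - s = k := by omega
    rw [hts, pvBSearch_one, List.drop_drop]
    by_cases h1 : pvIsBase ((w.drop s).take k) = true
    · by_cases h2 : pvIsBase (w.drop (s + k)) = true
      · simp [h1, h2]
      · simp [h1, h2, ih]
    · simp [h1, ih]

-- A's middle j-loop over relative cuts of word[s:] = B's cut loop at depth 2 over absolute cuts
theorem pvALoopJ_eq (w : List Char) (s : Nat) (p1 : List Char) (js : List Nat) :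
    pvALoopJ p1 (w.drop s) js =
      (pvBCuts w (pvBSearch w w.length 2) s (js.map (s + ·))).map (fun r => String.ofList p1 :: r) := by
  induction js with
  | nil => simp [pvALoopJ, pvBCuts]
  | cons j js ih =>
    simp only [List.map_cons, pvALoopJ, pvBCuts]
    have hts : s + j - s = j := by omega
    rw [hts, pvBSearch_two, List.drop_drop]
    by_cases h1 : pvIsBase ((w.drop s).take j) = true
    · by_cases h2 : pvIsBase (w.drop (s + j)) = true
      · simp [h1, h2]
      · -- neither is the whole suffix a base: A runs its k-loop, B recurses at depth 1
        have e2 : (w.drop (s + j)).length - 1 = w.length - (s + j + 1) := by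
          rw [List.length_drop]; omega
        rw [e2]
        have hk := pvALoopK_eq w w.length (s + j) p1 ((w.drop s).take j)
          (List.range' 1 (w.length - (s + j + 1)))
        rw [List.map_add_range'] at hk
        rw [hk]
        cases hX : pvBCuts w (pvBSearch w w.length 1) (s + j)
            (List.range' (s + j + 1) (w.length - (s + j + 1))) with
        | none => simp [h1, h2, ih]
        | some r => simp [h1, h2]
    · simp [h1, ih]

-- A's outer i-loop = B's top-level loop (cuts are already absolute there)
theorem pvALoopI_eq (w : List Char) (is : List Nat) :
    pvALoopI w is = pvBTop w w.length is := by
  induction is with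
  | nil => simp [pvALoopI, pvBTop]
  | cons i is ih =>
    simp only [pvALoopI, pvBTop]
    rw [pvBSearch_three]
    by_cases h1 : pvIsBase (w.take i) = true
    · by_cases h2 : pvIsBase (w.drop i) = true
      · simp [h1, h2]
      · have e2 : (w.drop i).length - 1 = w.length - (i + 1) := by
          rw [List.length_drop]; omega
        rw [e2]
        have hj := pvALoopJ_eq w i (w.take i) (List.range' 1 (w.length - (i + 1)))
        rw [List.map_add_range'] at hj
        rw [hj]
        cases hX : pvBCuts w (pvBSearch w w.length 2) i
            (List.range' (i + 1) (w.length - (i + 1))) with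
        | none => simp [h1, h2, ih]
        | some r => simp [h1, h2]
    · simp [h1, ih]

-- ===== VERDICT (by name: the statement is the Claim_ definition above) =====
theorem find_v8_splits_first_spec : Claim_equal_find_v8_splits_first := by
  intro word _
  show find_v8_splits_first word = find_v8_splits_first_alt word
  unfold find_v8_splits_first find_v8_splits_first_alt
  exact pvALoopI_eq word.toList _
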